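-- pv_equiv track=rewrite | github.com/Usopked/til | 자료구조/백준/Class/class5/10775.py | max_docking_planes
-- ===== SOURCE A (Python) =====
-- def find(parent, x):
--     if parent[x] != x:
--         parent[x] = find(parent, parent[x])
--     return parent[x]
--
-- def union(parent, a, b):
--     a = find(parent, a)
--     b = find(parent, b)
--     if a < b:
--         parent[b] = a
--     else:
--         parent[a] = b
--
-- def max_docking_planes(G, P, planes):
--     parent = [i for i in range(G + 1)]
--     result = 0
--     for plane in planes:
--         gate = find(parent, plane)
--         if gate == 0:
--             break
--         union(parent, gate, gate - 1)
--         result += 1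
--     return result
-- ===== SOURCE B (Python) =====
-- def max_docking_planes(G, P, planes):
--     # boolean availability array instead of union-find; gate 0 is the sentinel
--     avail = [True] * (G + 1)
--     result = 0
--     for plane in planes:
--         j = plane
--         while not avail[j]:
--             j -= 1
--         if j == 0:
--             break
--         avail[j] = False
--         result += 1
--     return result
-- ===== Notes on version B (the rewrite author's own statement) =====
-- stated objective: simpler
-- what changed: Replaces the recursive union-find with path compression by a plain boolean availability array scanned downward from each plane's limit, keeping gate 0 as the break sentinel.
-- outside the precondition, e.g. on max_docking_planes(1, 2, [-1, -1]): A returns 1, B returns 2; on max_docking_planes(3, 0, [-2, -2, -2, -2]): A returns 2, B raises IndexError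
import Mathlib
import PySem

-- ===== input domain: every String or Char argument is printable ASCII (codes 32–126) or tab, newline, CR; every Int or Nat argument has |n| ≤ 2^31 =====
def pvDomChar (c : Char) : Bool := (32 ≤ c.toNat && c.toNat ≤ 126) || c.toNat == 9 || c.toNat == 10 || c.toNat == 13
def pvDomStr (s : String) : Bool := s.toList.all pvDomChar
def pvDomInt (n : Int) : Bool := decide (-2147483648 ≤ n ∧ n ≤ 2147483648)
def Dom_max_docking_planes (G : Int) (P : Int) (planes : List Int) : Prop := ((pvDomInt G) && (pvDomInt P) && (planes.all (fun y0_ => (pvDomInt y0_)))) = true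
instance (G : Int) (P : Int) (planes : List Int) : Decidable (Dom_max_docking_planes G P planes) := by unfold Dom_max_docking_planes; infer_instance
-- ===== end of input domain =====

-- B replaces union-find by a boolean availability array scanned downward (simpler); return value only, A mutates no argument.

-- ===== PORT A =====
-- find(parent, x) with path compression; fuel is a totality guard only (chain length < fuel on admitted inputs)
def pvFindA : Nat → List Int → Int → List Int × Int
  | 0, parent, _ => (parent, 0)
  | fuel+1, parent, x =>
    if PySem.List.pyGetD parent x 0 ≠ x then
      let r := pvFindA fuel parent (PySem.List.pyGetD parent x 0)
      let parent' := PySem.List.pySetD r.1 x r.2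
      (parent', PySem.List.pyGetD parent' x 0)
    else (parent, PySem.List.pyGetD parent x 0)

def pvUnionA (parent : List Int) (a b : Int) : List Int :=
  let fa := pvFindA (parent.length + 1) parent a
  let fb := pvFindA (fa.1.length + 1) fa.1 b
  if fa.2 < fb.2 then PySem.List.pySetD fb.1 fb.2 fa.2
  else PySem.List.pySetD fb.1 fa.2 fb.2

def pvLoopA : List Int → List Int → Int → Int
  | _, [], result => result
  | parent, p :: rest, result =>
    let f := pvFindA (parent.length + 1) parent p
    if f.2 = 0 then result
    else pvLoopA (pvUnionA f.1 f.2 (f.2 - 1)) rest (result + 1)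

def max_docking_planes (G : Int) (P : Int) (planes : List Int) : Int :=
  pvLoopA (PySem.List.pyRange 0 (G + 1) 1) planes 0

-- ===== PORT B =====
-- while not avail[j]: j -= 1   (fuel is a totality guard; scan stops at gate 0 which stays available)
def pvScanB : Nat → List Bool → Int → Int
  | 0, _, j => j
  | fuel+1, avail, j =>
    if PySem.List.pyGetD avail j true = false then pvScanB fuel avail (j - 1) else j

def pvLoopB : List Bool → List Int → Int → Int
  | _, [], result => result
  | avail, p :: rest, result =>
    let j := pvScanB avail.length avail p
    if j = 0 then result
    else pvLoopB (PySem.List.pySetD avail j false) rest (result + 1)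

def max_docking_planes_alt (G : Int) (P : Int) (planes : List Int) : Int :=
  pvLoopB (List.replicate (G + 1).toNat true) planes 0

-- ===== PRECONDITION & SPEC =====
-- Pre_ restricts to the problem's natural domain: 0 ≤ G and every plane limit a real gate 1..G (or 0).
-- Planes > G make A raise IndexError; negative planes are Python negative-index wraparound inside A's
-- union-find, an accident of the implementation on inputs outside the problem's domain, where B's
-- downward scan may return a different count or raise.
def Pre_max_docking_planes (G : Int) (P : Int) (planes : List Int) : Prop :=
  0 ≤ G ∧ ∀ p ∈ planes, 0 ≤ p ∧ p ≤ G
instance (G : Int) (P : Int) (planes : List Int) : Decidable (Pre_max_docking_planes G P planes) := by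
  unfold Pre_max_docking_planes; infer_instance

def pvWitness_max_docking_planes : Int × Int × List Int := (3, 0, [2, 1, 2])

def Spec_max_docking_planes (G : Int) (P : Int) (planes : List Int) (out : Int) : Prop := out = max_docking_planes_alt G P planes
instance (G : Int) (P : Int) (planes : List Int) (out : Int) : Decidable (Spec_max_docking_planes G P planes out) := by unfold Spec_max_docking_planes; infer_instance

-- ===== CLAIM (what is proved, stated in full; the proofs are below) =====
def Claim_equal_max_docking_planes : Prop := ∀ (G : Int) (P : Int) (planes : List Int), Dom_max_docking_planes G P planes → Pre_max_docking_planes G P planes → Spec_max_docking_planes G P planes (max_docking_planes G P planes)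

-- ===== LEMMAS AND PROOFS =====

-- spec-level root: largest available index ≤ n (0 is the fallback)
def pvRoot (avail : List Bool) : Nat → Nat
  | 0 => 0
  | n+1 => if avail.getD (n+1) false then n+1 else pvRoot avail n

lemma pvGetD_set_self {α : Type} (l : List α) (i : Nat) (v d : α) (h : i < l.length) :
    (l.set i v).getD i d = v := by
  simp [List.getD, List.getElem?_set_self h]

lemma pvGetD_set_ne {α : Type} (l : List α) (i k : Nat) (v d : α) (h : i ≠ k) :
    (l.set i v).getD k d = l.getD k d := by
  simp [List.getD, List.getElem?_set_ne h]

lemma pvGetD_out {α : Type} (l : List α) (i : Nat) (d : α) (h : l.length ≤ i) :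
    l.getD i d = d := by
  simp [List.getD, List.getElem?_eq_none h]

lemma pvRoot_le (avail : List Bool) (n : Nat) : pvRoot avail n ≤ n := by
  induction n with
  | zero => simp [pvRoot]
  | succ m ih => simp only [pvRoot]; split <;> omega

lemma pvRoot_avail (avail : List Bool) (h0 : avail.getD 0 false = true) (n : Nat) :
    avail.getD (pvRoot avail n) false = true := by
  induction n with
  | zero => simpa [pvRoot] using h0
  | succ m ih =>
    simp only [pvRoot]
    by_cases hv : avail.getD (m+1) false = true
    · rw [if_pos hv]; exact hv
    · rw [if_neg hv]; exact ih

lemma pvRoot_eq_self (avail : List Bool) (n : Nat) (h : avail.getD n false = true) :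
    pvRoot avail n = n := by
  cases n with
  | zero => rfl
  | succ m => simp only [pvRoot]; rw [if_pos h]

lemma pvRoot_idem (avail : List Bool) (h0 : avail.getD 0 false = true) (n : Nat) :
    pvRoot avail (pvRoot avail n) = pvRoot avail n :=
  pvRoot_eq_self _ _ (pvRoot_avail _ h0 _)

lemma pvRoot_lt_of_not (avail : List Bool) (h0 : avail.getD 0 false = true)
    (n : Nat) (h : avail.getD n false = false) : pvRoot avail n < n := by
  cases n with
  | zero => rw [h0] at h; cases h
  | succ m =>
    simp only [pvRoot]
    rw [if_neg (by rw [h]; exact Bool.false_ne_true)]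
    exact Nat.lt_succ_of_le (pvRoot_le avail m)

lemma pvRoot_set_lt (avail : List Bool) (g : Nat) :
    ∀ m, m < g → pvRoot (avail.set g false) m = pvRoot avail m := by
  intro m hm
  induction m with
  | zero => rfl
  | succ k ih =>
    have hne : g ≠ k + 1 := by omega
    simp only [pvRoot, pvGetD_set_ne avail g (k+1) false false hne]
    by_cases hv : avail.getD (k+1) false = true
    · simp only [if_pos hv]
    · simp only [if_neg hv]; exact ih (by omega)

lemma pvRoot_set (avail : List Bool) (g : Nat) (hg : 0 < g) (n : Nat) :
    pvRoot (avail.set g false) n =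
      if pvRoot avail n = g then pvRoot avail (g - 1) else pvRoot avail n := by
  induction n with
  | zero =>
    simp only [pvRoot]
    rw [if_neg (by omega)]
  | succ m ih =>
    by_cases hge : m + 1 = g
    · subst hge
      have hfalse : (avail.set (m+1) false).getD (m+1) false = false := by
        rcases Nat.lt_or_ge (m+1) avail.length with h | h
        · exact pvGetD_set_self avail (m+1) false false h
        · rw [pvGetD_out _ _ _ (by simpa [List.length_set] using h)]
      simp only [pvRoot]
      rw [if_neg (by rw [hfalse]; exact Bool.false_ne_true)]
      rw [pvRoot_set_lt avail (m+1) m (by omega)]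
      have hm1 : m + 1 - 1 = m := rfl
      by_cases hv : avail.getD (m+1) false = true
      · simp only [if_pos hv, hm1]
        simp
      · simp only [if_neg hv, hm1]
        split <;> rfl
    · have hne : g ≠ m + 1 := fun h => hge h.symm
      simp only [pvRoot, pvGetD_set_ne avail g (m+1) false false hne]
      by_cases hv : avail.getD (m+1) false = true
      · simp only [if_pos hv]
        rw [if_neg hge]
      · simp only [if_neg hv]
        exact ih

-- the coupling invariant between A's parent array and B's availability array
def pvInv (parent : List Int) (avail : List Bool) : Prop :=
  parent.length = avail.length ∧
  avail.getD 0 false = true ∧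
  ∀ k : Nat, k < parent.length →
    0 ≤ parent.getD k 0 ∧ (parent.getD k 0).toNat ≤ k ∧
    pvRoot avail (parent.getD k 0).toNat = pvRoot avail k ∧
    ((parent.getD k 0).toNat = k ↔ avail.getD k false = true)

lemma pvFindA_ok : ∀ (fuel : Nat) (parent : List Int) (avail : List Bool) (x : Nat),
    pvInv parent avail → x < parent.length → x < fuel →
    ∃ p', pvFindA fuel parent (x : Int) = (p', ((pvRoot avail x : Nat) : Int)) ∧
      pvInv p' avail ∧ p'.length = parent.length := by
  intro fuel
  induction fuel with
  | zero => intro _ _ x _ _ h; omega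
  | succ n ih =>
    intro parent avail x hinv hx hfuel
    have hlen := hinv.1
    have h0 := hinv.2.1
    obtain ⟨hpos, hle, hroot, hiff⟩ := hinv.2.2 x hx
    have hget : PySem.List.pyGetD parent (x : Int) 0 = parent.getD x 0 := by
      simp [PySem.List.pyGetD_natCast]
    by_cases heq : parent.getD x 0 = (x : Int)
    · refine ⟨parent, ?_, hinv, rfl⟩
      have hx' : (parent.getD x 0).toNat = x := by omega
      have hav : avail.getD x false = true := hiff.mp hx'
      rw [pvRoot_eq_self avail x hav]
      simp only [pvFindA, hget]
      rw [if_neg (fun hne => hne heq)]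
      rw [heq]
    · have hxne : (parent.getD x 0).toNat ≠ x := by omega
      have hlt : (parent.getD x 0).toNat < x := by omega
      have hcast : (((parent.getD x 0).toNat : Nat) : Int) = parent.getD x 0 := by omega
      obtain ⟨p1, hrec, hinv1, hlen1⟩ :=
        ih parent avail (parent.getD x 0).toNat hinv (by omega) (by omega)
      rw [hcast] at hrec
      have hrootx : pvRoot avail x < x := by
        have hav : avail.getD x false = false := by
          by_cases hb : avail.getD x false = true
          · exact absurd (hiff.mpr hb) hxne
          · exact eq_false_of_ne_true hb
        exact pvRoot_lt_of_not avail h0 x hav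
      have hxlen1 : x < p1.length := by omega
      refine ⟨p1.set x ((pvRoot avail x : Nat) : Int), ?_, ?_, by simp [hlen1]⟩
      · simp only [pvFindA, hget]
        rw [if_pos (by simpa using heq)]
        rw [hrec]
        simp only
        have hset : PySem.List.pySetD p1 (x : Int) ((pvRoot avail (parent.getD x 0).toNat : Nat) : Int)
            = p1.set x ((pvRoot avail (parent.getD x 0).toNat : Nat) : Int) := by
          simp [PySem.List.pySetD_natCast]
        rw [hroot] at hset ⊢
        rw [hset]
        have hg2 : PySem.List.pyGetD (p1.set x ((pvRoot avail x : Nat) : Int)) (x : Int) 0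
            = ((pvRoot avail x : Nat) : Int) := by
          rw [PySem.List.pyGetD_natCast]
          simpa using pvGetD_set_self p1 x ((pvRoot avail x : Nat) : Int) 0 hxlen1
        rw [hg2]
      · refine ⟨by simp [hlen1, hlen], h0, ?_⟩
        intro k hk
        rw [List.length_set] at hk
        by_cases hkx : k = x
        · subst hkx
          rw [pvGetD_set_self p1 k ((pvRoot avail k : Nat) : Int) 0 hxlen1]
          refine ⟨Int.natCast_nonneg _, ?_, ?_, ?_⟩
          · simp only [Int.toNat_natCast]
            exact Nat.le_of_lt hrootx
          · simp only [Int.toNat_natCast]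
            exact pvRoot_idem avail h0 k
          · simp only [Int.toNat_natCast]
            constructor
            · intro h; omega
            · intro h
              exact absurd (pvRoot_eq_self avail k h) (by omega)
        · rw [pvGetD_set_ne p1 x k ((pvRoot avail x : Nat) : Int) 0 (fun h => hkx h.symm)]
          exact hinv1.2.2 k (by omega)

lemma pvUnionA_ok (parent : List Int) (avail : List Bool) (g : Nat)
    (hinv : pvInv parent avail) (hg : 0 < g) (hlt : g < parent.length)
    (hav : avail.getD g false = true) :
    ∃ q, pvUnionA parent (g : Int) ((g : Int) - 1) = q ∧
      pvInv q (avail.set g false) ∧ q.length = parent.length := by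
  have hlen := hinv.1
  have h0 := hinv.2.1
  obtain ⟨p1, hfind1, hinv1, hlen1⟩ := pvFindA_ok (parent.length + 1) parent avail g hinv hlt (by omega)
  rw [pvRoot_eq_self avail g hav] at hfind1
  have hcast : ((g : Int) - 1) = (((g - 1 : Nat)) : Int) := by omega
  obtain ⟨p2, hfind2, hinv2, hlen2⟩ :=
    pvFindA_ok (p1.length + 1) p1 avail (g - 1) hinv1 (by omega) (by omega)
  set r : Nat := pvRoot avail (g - 1) with hr
  have hrle : r ≤ g - 1 := pvRoot_le avail (g - 1)
  have hstep : pvUnionA parent (g : Int) ((g : Int) - 1) = p2.set g ((r : Nat) : Int) := by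
    unfold pvUnionA
    rw [hfind1]
    simp only
    rw [hcast, hfind2]
    simp only
    rw [if_neg (by omega)]
    simp [PySem.List.pySetD_natCast]
  refine ⟨p2.set g ((r : Nat) : Int), hstep, ?_, by simp [hlen2, hlen1]⟩
  have hglen : g < p2.length := by omega
  have h0set : (avail.set g false).getD 0 false = true := by
    rw [pvGetD_set_ne avail g 0 false false (by omega)]
    exact h0
  have hmap : ∀ m : Nat, pvRoot (avail.set g false) m =
      if pvRoot avail m = g then pvRoot avail (g - 1) else pvRoot avail m :=
    fun m => pvRoot_set avail g hg m
  refine ⟨by simp [hlen2, hlen1, hlen], h0set, ?_⟩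
  intro k hk
  rw [List.length_set] at hk
  by_cases hkg : k = g
  · subst hkg
    rw [pvGetD_set_self p2 k ((r : Nat) : Int) 0 hglen]
    refine ⟨Int.natCast_nonneg _, by simp only [Int.toNat_natCast]; omega, ?_, ?_⟩
    · simp only [Int.toNat_natCast]
      rw [hmap r, hmap k]
      rw [pvRoot_idem avail h0, pvRoot_eq_self avail k hav]
      rw [if_neg (by omega), if_pos rfl]
    · have hfalse : (avail.set k false).getD k false = false := by
        rcases Nat.lt_or_ge k avail.length with h | h
        · exact pvGetD_set_self avail k false false h
        · omega
      rw [hfalse]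
      simp only [Int.toNat_natCast]
      constructor
      · intro h; omega
      · intro h; cases h
  · rw [pvGetD_set_ne p2 g k ((r : Nat) : Int) 0 (fun h => hkg h.symm)]
    obtain ⟨hpos, hle, hroot, hiff⟩ := hinv2.2.2 k (by omega)
    have havk : (avail.set g false).getD k false = avail.getD k false :=
      pvGetD_set_ne avail g k false false (fun h => hkg h.symm)
    refine ⟨hpos, hle, ?_, by rw [havk]; exact hiff⟩
    rw [hmap, hmap, hroot]

lemma pvScanB_ok : ∀ (fuel : Nat) (avail : List Bool) (x : Nat),
    avail.getD 0 false = true → x < avail.length → x < fuel →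
    pvScanB fuel avail (x : Int) = ((pvRoot avail x : Nat) : Int) := by
  intro fuel
  induction fuel with
  | zero => intro _ x _ _ h; omega
  | succ n ih =>
    intro avail x h0 hx hfuel
    have hget : PySem.List.pyGetD avail (x : Int) true = avail.getD x false := by
      rw [PySem.List.pyGetD_natCast]
      simp [List.getD, List.getElem?_eq_getElem hx]
    by_cases hv : avail.getD x false = true
    · rw [pvRoot_eq_self avail x hv]
      simp only [pvScanB, hget]
      rw [if_neg (by rw [hv]; exact fun h => Bool.false_ne_true h.symm)]
    · have hvf : avail.getD x false = false := eq_false_of_ne_true hv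
      cases x with
      | zero => rw [h0] at hvf; cases hvf
      | succ m =>
        have hcast : ((m + 1 : Nat) : Int) - 1 = (m : Int) := by omega
        simp only [pvScanB, hget]
        rw [if_pos hvf, hcast]
        rw [ih avail m h0 (by omega) (by omega)]
        simp only [pvRoot]
        rw [if_neg (by rw [hvf]; exact Bool.false_ne_true)]

lemma pvLoop_ok : ∀ (planes : List Int) (parent : List Int) (avail : List Bool) (result : Int),
    pvInv parent avail → (∀ p ∈ planes, 0 ≤ p ∧ p < (avail.length : Int)) →
    pvLoopA parent planes result = pvLoopB avail planes result := by
  intro planes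
  induction planes with
  | nil => intro _ _ _ _ _; rfl
  | cons p rest ih =>
    intro parent avail result hinv hdom
    obtain ⟨hp0, hplt⟩ := hdom p (List.mem_cons_self)
    have hlen : parent.length = avail.length := hinv.1
    have h0 : avail.getD 0 false = true := hinv.2.1
    set x : Nat := p.toNat with hx
    have hpx : p = (x : Int) := by omega
    have hxlt : x < parent.length := by omega
    obtain ⟨p1, hfind, hinv1, hlen1⟩ := pvFindA_ok (parent.length + 1) parent avail x hinv hxlt (by omega)
    set g : Nat := pvRoot avail x with hgdef
    have hscan : pvScanB avail.length avail (x : Int) = ((g : Nat) : Int) :=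
      pvScanB_ok avail.length avail x h0 (by omega) (by omega)
    simp only [pvLoopA, pvLoopB, hpx]
    rw [hfind, hscan]
    simp only
    by_cases hg0 : g = 0
    · simp [hg0]
    · have hgpos : 0 < g := Nat.pos_of_ne_zero hg0
      have hne : ((g : Nat) : Int) ≠ 0 := by omega
      rw [if_neg hne, if_neg hne]
      have hav : avail.getD g false = true := hgdef ▸ pvRoot_avail avail h0 x
      have hglt : g < p1.length := by
        have := pvRoot_le avail x
        omega
      obtain ⟨q, hunion, hinvq, hlenq⟩ := pvUnionA_ok p1 avail g hinv1 hgpos hglt hav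
      rw [hunion]
      have hsetD : PySem.List.pySetD avail ((g : Nat) : Int) false = avail.set g false := by
        simp [PySem.List.pySetD_natCast]
      rw [hsetD]
      exact ih q (avail.set g false) (result + 1) hinvq
        (fun p' hp' => by
          obtain ⟨h1, h2⟩ := hdom p' (List.mem_cons_of_mem _ hp')
          exact ⟨h1, by simpa [List.length_set] using h2⟩)

lemma pvInv_init (G : Int) (hG : 0 ≤ G) :
    pvInv (PySem.List.pyRange 0 (G + 1) 1) (List.replicate (G + 1).toNat true) := by
  have hlen : (PySem.List.pyRange 0 (G + 1) 1).length = (G + 1).toNat := by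
    rw [PySem.List.length_pyRange_one]; omega
  have hpos : 0 < (G + 1).toNat := by omega
  refine ⟨by simp [hlen], ?_, ?_⟩
  · simp [List.getD, hpos]
  · intro k hk
    rw [hlen] at hk
    have hget : (PySem.List.pyRange 0 (G + 1) 1).getD k 0 = (k : Int) := by
      rw [List.getD, List.getElem?_eq_getElem (by rw [hlen]; exact hk)]
      simp [PySem.List.getElem_pyRange_one]
    have hav : (List.replicate (G + 1).toNat true).getD k false = true := by
      simp [List.getD, hk]
    rw [hget, hav]
    simp

-- ===== VERDICT (by name: the statement is the Claim_ definition above) =====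
theorem max_docking_planes_spec : Claim_equal_max_docking_planes := by
  intro G P planes _ hpre
  obtain ⟨hG, hplanes⟩ := hpre
  unfold Spec_max_docking_planes max_docking_planes max_docking_planes_alt
  apply pvLoop_ok planes _ _ 0 (pvInv_init G hG)
  intro p hp
  obtain ⟨h1, h2⟩ := hplanes p hp
  refine ⟨h1, ?_⟩
  rw [List.length_replicate]
  omega
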